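-- pv_equiv track=rewrite | github.com/ClaudioSMV/AzimuthalAnalysis | macros/myStyle.py | format_non_integrated_vars
-- ===== SOURCE A (Python) =====
-- def format_non_integrated_vars(single_str, versus_x_format= False):
-- # Return single_str with the format required (bQZN-->QNZ or bQPZ-->QvPxZ)
--     formatted_str = ""
--     # Maintain order given and add extra info of VS and x-axis (for Summary)
--     if versus_x_format:
--         # Transforms QZ --> QxZ; ZP --> ZxP (bins of Z and function of P)
--         formatted_str = "%sx%s"%(single_str[-2], single_str[-1])
--         # If there is one letter before, then QNZ --> QvNxZ; QZP --> QvZxP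
--         # Which means: 2d bins of Q and Z, as function of P, for instance
--         if len(single_str[1:]) == 3:
--             formatted_str = "%sv%s"%(single_str[1], formatted_str)
--     # Else change single_str to use default order [Q,N,X,Z,P]
--     else:
--         for letter in ["Q","N","X","Z","P"]:
--             if letter not in single_str[1:]:
--                 continue
--             formatted_str+= letter
--     kinematic_vars = str(formatted_str)
--
--     return kinematic_vars
-- ===== SOURCE B (Python) =====
-- def format_non_integrated_vars(single_str, versus_x_format=False):
--     if versus_x_format:
--         formatted_str = "%sx%s" % (single_str[-2], single_str[-1])
--         if len(single_str[1:]) == 3: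
--             formatted_str = "%sv%s" % (single_str[1], formatted_str)
--         return str(formatted_str)
--     return "".join(sorted({c for c in single_str[1:] if c in "QNXZP"},
--                           key="QNXZP".index))
-- ===== Notes on version B (the rewrite author's own statement) =====
-- stated objective: idiomatic
-- what changed: The canonical-order branch no longer scans the fixed alphabet appending present letters; it collects the present alphabet letters from the input into a set and sorts them by their index in the canonical alphabet.
import Mathlib
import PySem

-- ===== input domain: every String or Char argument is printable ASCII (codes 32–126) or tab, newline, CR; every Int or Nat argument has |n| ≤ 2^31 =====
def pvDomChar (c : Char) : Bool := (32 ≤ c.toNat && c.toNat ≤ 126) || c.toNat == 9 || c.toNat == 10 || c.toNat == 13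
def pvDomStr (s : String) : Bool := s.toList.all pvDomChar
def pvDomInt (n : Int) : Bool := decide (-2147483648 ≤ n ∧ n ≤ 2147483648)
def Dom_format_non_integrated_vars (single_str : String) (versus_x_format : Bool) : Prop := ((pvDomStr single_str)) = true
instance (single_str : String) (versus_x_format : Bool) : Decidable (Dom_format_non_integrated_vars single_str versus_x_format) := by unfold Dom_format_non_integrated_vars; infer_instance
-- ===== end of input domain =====

-- B replaces A's scan over the fixed alphabet by a set of the input's alphabet letters
-- sorted by canonical index (idiomatic); the versus_x branch is unchanged fixed formatting.

-- ===== PORT A =====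
-- Python's `letter in single_str[1:]` (substring test) is PySem.Chars.isIn [letter] (cs.drop 1); exact.
def format_non_integrated_vars (single_str : String) (versus_x_format : Bool) : String :=
  let cs := single_str.toList
  if versus_x_format then
    -- "%sx%s" % (single_str[-2], single_str[-1]); in range under Pre_
    let f1 := [PySem.List.pyGetD cs (-2) ' ', 'x', PySem.List.pyGetD cs (-1) ' ']
    let f2 := if (cs.drop 1).length = 3 then PySem.List.pyGetD cs 1 ' ' :: 'v' :: f1 else f1
    String.mk f2
  else
    String.mk (['Q', 'N', 'X', 'Z', 'P'].foldl
      (fun acc letter => if PySem.Chars.isIn [letter] (cs.drop 1) then acc ++ [letter] else acc) [])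

-- ===== PORT B =====
def pvCanonical : List Char := ['Q', 'N', 'X', 'Z', 'P']

-- key "QNXZP".index: str.index = Chars.find on arguments that occur in the string (all sorted elements do)
def format_non_integrated_vars_alt (single_str : String) (versus_x_format : Bool) : String :=
  let cs := single_str.toList
  if versus_x_format then
    let f1 := [PySem.List.pyGetD cs (-2) ' ', 'x', PySem.List.pyGetD cs (-1) ' ']
    let f2 := if (cs.drop 1).length = 3 then PySem.List.pyGetD cs 1 ' ' :: 'v' :: f1 else f1
    String.mk f2
  else
    let present : PySem.Set Char :=
      PySem.Set.ofList ((cs.drop 1).filter (fun c => PySem.Chars.isIn [c] pvCanonical))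
    String.mk (PySem.List.sorted present (fun c => PySem.Chars.find pvCanonical [c]) false)

-- ===== PRECONDITION & SPEC =====
-- Pre_ excludes exactly the inputs where A raises IndexError: versus_x_format with |single_str| < 2.
def Pre_format_non_integrated_vars (single_str : String) (versus_x_format : Bool) : Prop :=
  versus_x_format = true → 2 ≤ single_str.toList.length
instance (single_str : String) (versus_x_format : Bool) : Decidable (Pre_format_non_integrated_vars single_str versus_x_format) := by unfold Pre_format_non_integrated_vars; infer_instance
def pvWitness_format_non_integrated_vars : String × Bool := ("bQZ", true)
def Spec_format_non_integrated_vars (single_str : String) (versus_x_format : Bool) (out : String) : Prop := out = format_non_integrated_vars_alt single_str versus_x_format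
instance (single_str : String) (versus_x_format : Bool) (out : String) : Decidable (Spec_format_non_integrated_vars single_str versus_x_format out) := by unfold Spec_format_non_integrated_vars; infer_instance

-- ===== CLAIM (what is proved, stated in full; the proofs are below) =====
def Claim_equal_format_non_integrated_vars : Prop := ∀ (single_str : String) (versus_x_format : Bool), Dom_format_non_integrated_vars single_str versus_x_format → Pre_format_non_integrated_vars single_str versus_x_format → Spec_format_non_integrated_vars single_str versus_x_format (format_non_integrated_vars single_str versus_x_format)

-- ===== LEMMAS AND PROOFS =====

theorem pv_isIn_singleton (c : Char) (t : List Char) :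
    PySem.Chars.isIn [c] t = true ↔ c ∈ t := by
  rw [PySem.Chars.isIn_iff_infix]; exact List.singleton_infix_iff c t

-- A's alphabet scan equals B's sorted set, for any tail t
theorem pv_else_branch (t : List Char) :
    ['Q', 'N', 'X', 'Z', 'P'].foldl
      (fun acc letter => if PySem.Chars.isIn [letter] t then acc ++ [letter] else acc) []
    = PySem.List.sorted
        (PySem.Set.ofList (t.filter (fun c => PySem.Chars.isIn [c] pvCanonical)))
        (fun c => PySem.Chars.find pvCanonical [c]) false := by
  rw [PySem.List.foldl_append_if_eq_filter, List.nil_append]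
  have hperm : (['Q', 'N', 'X', 'Z', 'P'].filter (fun letter => PySem.Chars.isIn [letter] t)).Perm
      (PySem.Set.ofList (t.filter (fun c => PySem.Chars.isIn [c] pvCanonical))) := by
    refine (List.perm_ext_iff_of_nodup
      (List.Nodup.filter _ (by decide)) (PySem.Set.nodup_ofList _)).mpr ?_
    intro a
    simp only [List.mem_filter, PySem.Set.mem_ofList, pv_isIn_singleton]
    show a ∈ pvCanonical ∧ a ∈ t ↔ a ∈ t ∧ a ∈ pvCanonical
    tauto
  have hpair := List.Pairwise.sublist
      (List.filter_sublist (p := fun letter => PySem.Chars.isIn [letter] t) (l := pvCanonical))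
      (by decide :
        pvCanonical.Pairwise (fun a b =>
          PySem.Chars.find pvCanonical [a] < PySem.Chars.find pvCanonical [b]))
  exact (PySem.List.sorted_eq_of_perm_of_pairwise_lt _ _ _ hperm hpair).symm

-- ===== VERDICT (by name: the statement is the Claim_ definition above) =====
theorem format_non_integrated_vars_spec : Claim_equal_format_non_integrated_vars := by
  intro s v _ _
  unfold Spec_format_non_integrated_vars format_non_integrated_vars format_non_integrated_vars_alt
  cases v with
  | true => rfl
  | false => simpa using congrArg String.mk (pv_else_branch (s.toList.drop 1))
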